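-- pv_equiv track=rewrite | github.com/max11357/NEW_WLSS | [MAIN] ฟังชั่น run multi files ล่าสุด!!!/run8.py | ch_collect_data
-- ===== SOURCE A (Python) =====
-- def ch_collect_data(cluster_head, cluster_member, dead, cm_select, log_cm_select):
--     max_distance = []
--     ch_select = []
--     count_ch_member = []
--     amount_cm_in_ch = {}
--
--     for ch in range(len(cluster_head)):
--         amount_cm_in_ch.update({ch:0})
--
--     if dead == 0:
--         #count amount of cm of each ch in dict
--         for ch1 in amount_cm_in_ch:
--             for ch2 in range(len(log_cm_select)):
--                 if ch1 == log_cm_select[ch2][0]: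
--                     amount_cm_in_ch[ch1] += 1
--
--         # if ch didn't have cm at all
--         for ch3 in amount_cm_in_ch.keys():
--             count_ch_member.append(amount_cm_in_ch[ch3])
--             if amount_cm_in_ch[ch3] == 0:
--                 cm_select.append([ch3, 0])
--                 log_cm_select.append([ch3, 0])
--
--         # collect maximum range of each ch can get from they cm
--         log_cm_select = sorted(log_cm_select, key=lambda ch: ch[0])
--         log = []
--         check_ch = 0
--         for cm in log_cm_select:
--             if cm[0] != -1 and cm[0] == check_ch:
--                 log.append(cm)
--             elif cm[0] != -1 and cm[0] != check_ch:
--                 ch_select.append(log)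
--                 log = []
--                 log.append(cm)
--                 check_ch += 1
--         ch_select.append(log)
--
--         for k in range(len(ch_select)):
--             log_max = max(b for (a, b) in ch_select[k])
--             max_distance.append([k, log_max])
--
--     return max_distance, dead, count_ch_member
-- ===== SOURCE B (Python) =====
-- def ch_collect_data(cluster_head, cluster_member, dead, cm_select, log_cm_select):
--     if dead != 0:
--         return [], dead, []
--     n = len(cluster_head)
--     counts = [0] * n
--     for e in log_cm_select:
--         h = e[0]
--         if 0 <= h < n:
--             counts[h] += 1
--     count_ch_member = list(counts)
--     for h in range(n):
--         if counts[h] == 0: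
--             cm_select.append([h, 0])
--             log_cm_select.append([h, 0])
--     best = {}
--     for e in log_cm_select:
--         h = e[0]
--         if h != -1:
--             d = e[1]
--             if h not in best or d > best[h]:
--                 best[h] = d
--     max_distance = [[h, best[h]] for h in range(n)]
--     return max_distance, dead, count_ch_member
-- ===== Notes on version B (the rewrite author's own statement) =====
-- stated objective: faster
-- what changed: B replaces A's dict-seeded nested counting scan (O(n*m)) and its sort-then-group-then-max pipeline by one direct counting pass into an index table and one pass that keeps a running per-head maximum in a dict, indexing the output by range(n); the sort and the check_ch group scan disappear.
-- outside the precondition, e.g. on ch_collect_data([5], [], 0, [], [[3, 7]]): A returns ([[0, 0], [1, 7]], 0, [0]), B returns ([[0, 0]], 0, [0]); on ch_collect_data([], [], 0, [], []): A raises ValueError, B returns ([], 0, []); on ch_collect_data([1], [], 0, [], [[0, 7, 9]]): A raises ValueError, B returns ([[0, 7]], 0, [1])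
import Mathlib
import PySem

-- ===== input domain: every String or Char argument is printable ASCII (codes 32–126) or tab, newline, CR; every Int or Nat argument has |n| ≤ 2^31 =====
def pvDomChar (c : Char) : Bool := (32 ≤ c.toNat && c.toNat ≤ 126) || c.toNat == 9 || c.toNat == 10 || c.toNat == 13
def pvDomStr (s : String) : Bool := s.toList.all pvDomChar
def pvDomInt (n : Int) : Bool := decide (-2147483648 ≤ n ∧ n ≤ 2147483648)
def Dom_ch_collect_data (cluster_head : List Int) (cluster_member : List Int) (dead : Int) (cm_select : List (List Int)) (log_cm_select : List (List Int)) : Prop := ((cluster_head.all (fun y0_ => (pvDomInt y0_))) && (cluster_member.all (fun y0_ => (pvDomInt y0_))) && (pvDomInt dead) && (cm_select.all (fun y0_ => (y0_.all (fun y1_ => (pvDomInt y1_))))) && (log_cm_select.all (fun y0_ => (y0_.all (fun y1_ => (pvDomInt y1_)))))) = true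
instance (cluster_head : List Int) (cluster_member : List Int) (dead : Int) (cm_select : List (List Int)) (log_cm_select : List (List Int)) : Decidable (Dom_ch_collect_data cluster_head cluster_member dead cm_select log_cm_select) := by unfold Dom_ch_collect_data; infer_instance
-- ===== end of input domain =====

-- B replaces A's nested counting scan and sort+group+max pipeline by two direct passes
-- (an index table of counts and a running per-head maximum dict); return-value
-- equivalence only — both Pythons append the same zero rows to cm_select/log_cm_select.

-- ===== PORT A =====
def ch_collect_data (cluster_head : List Int) (cluster_member : List Int) (dead : Int) (cm_select : List (List Int)) (log_cm_select : List (List Int)) : List (List Int) × Int × List Int :=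
  -- amount_cm_in_ch = {ch: 0 for ch in range(len(cluster_head))}
  let amount0 : PySem.Dict Int Int :=
    (PySem.List.pyRange 0 (PySem.List.len cluster_head) 1).foldl (fun d ch => d.insert ch 0) PySem.Dict.empty
  if dead = 0 then
    -- nested counting loop over the dict keys and range(len(log_cm_select))
    let amount : PySem.Dict Int Int :=
      amount0.keys.foldl (fun d ch1 =>
        (PySem.List.pyRange 0 (PySem.List.len log_cm_select) 1).foldl (fun d ch2 =>
          if ch1 = PySem.List.pyGetD (PySem.List.pyGetD log_cm_select ch2 []) 0 0
          then d.modify ch1 0 (· + 1) else d) d) amount0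
    -- count_ch_member append + zero rows appended to cm_select / log_cm_select
    let st :=
      amount.keys.foldl (fun (st : List Int × List (List Int) × List (List Int)) ch3 =>
        let st' := (st.1 ++ [amount.getD ch3 0], st.2.1, st.2.2)
        if amount.getD ch3 0 = 0 then (st'.1, st'.2.1 ++ [[ch3, 0]], st'.2.2 ++ [[ch3, 0]]) else st')
        ([], cm_select, log_cm_select)
    -- log_cm_select = sorted(log_cm_select, key=lambda ch: ch[0])
    let log2 := PySem.List.sorted st.2.2 (fun ch => PySem.List.pyGetD ch 0 0) false
    -- group scan with the check_ch counter
    let g :=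
      log2.foldl (fun (st : List (List (List Int)) × List (List Int) × Int) cm =>
        if PySem.List.pyGetD cm 0 0 ≠ -1 ∧ PySem.List.pyGetD cm 0 0 = st.2.2 then
          (st.1, st.2.1 ++ [cm], st.2.2)
        else if PySem.List.pyGetD cm 0 0 ≠ -1 ∧ PySem.List.pyGetD cm 0 0 ≠ st.2.2 then
          (st.1 ++ [st.2.1], [cm], st.2.2 + 1)
        else st)
        ([], ([] : List (List Int)), (0 : Int))
    let ch_select := g.1 ++ [g.2.1]
    -- max_distance.append([k, max(b for (a, b) in ch_select[k])])
    let max_distance :=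
      (PySem.List.pyRange 0 (PySem.List.len ch_select) 1).foldl (fun acc k =>
        acc ++ [[k, (PySem.List.max? ((PySem.List.pyGetD ch_select k []).map (fun e => PySem.List.pyGetD e 1 0)) (fun b => b)).getD 0]]) []
    (max_distance, dead, st.1)
  else ([], dead, [])

-- ===== PORT B =====
def ch_collect_data_alt (cluster_head : List Int) (cluster_member : List Int) (dead : Int) (cm_select : List (List Int)) (log_cm_select : List (List Int)) : List (List Int) × Int × List Int :=
  if dead ≠ 0 then ([], dead, [])
  else
    let n := cluster_head.length
    -- one counting pass into an index table
    let counts : List Int :=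
      log_cm_select.foldl (fun cs e =>
        if 0 ≤ PySem.List.pyGetD e 0 0 ∧ PySem.List.pyGetD e 0 0 < (n : Int)
        then PySem.List.pySetD cs (PySem.List.pyGetD e 0 0) (PySem.List.pyGetD cs (PySem.List.pyGetD e 0 0) 0 + 1)
        else cs) (List.replicate n 0)
    -- zero rows for heads without members
    let p :=
      (List.range n).foldl (fun (p : List (List Int) × List (List Int)) h =>
        if counts.getD h 0 = 0 then (p.1 ++ [[(h : Int), 0]], p.2 ++ [[(h : Int), 0]]) else p)
        (cm_select, log_cm_select)
    -- one pass keeping the running per-head maximum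
    let best : PySem.Dict Int Int :=
      p.2.foldl (fun b e =>
        if PySem.List.pyGetD e 0 0 ≠ -1 then
          (if b.contains (PySem.List.pyGetD e 0 0) = false ∨ b.getD (PySem.List.pyGetD e 0 0) 0 < PySem.List.pyGetD e 1 0
           then b.insert (PySem.List.pyGetD e 0 0) (PySem.List.pyGetD e 1 0) else b)
        else b) PySem.Dict.empty
    ((List.range n).map (fun h : Nat => [(h : Int), best.getD (h : Int) 0]), dead, counts)

-- ===== PRECONDITION & SPEC =====
-- Pre_ restricts (for dead == 0) to the function's natural domain: a nonempty cluster_head and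
-- log entries that are nonempty with head -1, or [head, distance] pairs with 0 <= head < len(cluster_head);
-- outside it A raises ValueError on an empty group/bad unpacking, or (for an out-of-range head)
-- returns extra rows produced by its check_ch counter drifting past the real head values.
def Pre_ch_collect_data (cluster_head : List Int) (cluster_member : List Int) (dead : Int) (cm_select : List (List Int)) (log_cm_select : List (List Int)) : Prop :=
  dead ≠ 0 ∨ (cluster_head ≠ [] ∧ ∀ e ∈ log_cm_select, e ≠ [] ∧
    (e.getD 0 0 = -1 ∨ (0 ≤ e.getD 0 0 ∧ e.getD 0 0 < (cluster_head.length : Int) ∧ e.length = 2)))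
instance (cluster_head : List Int) (cluster_member : List Int) (dead : Int) (cm_select : List (List Int)) (log_cm_select : List (List Int)) : Decidable (Pre_ch_collect_data cluster_head cluster_member dead cm_select log_cm_select) := by unfold Pre_ch_collect_data; infer_instance

def pvWitness_ch_collect_data : List Int × List Int × Int × List (List Int) × List (List Int) :=
  ([7, 9], [], 0, [], [[0, 3], [-1, 2], [0, 5]])

def Spec_ch_collect_data (cluster_head : List Int) (cluster_member : List Int) (dead : Int) (cm_select : List (List Int)) (log_cm_select : List (List Int)) (out : List (List Int) × Int × List Int) : Prop := out = ch_collect_data_alt cluster_head cluster_member dead cm_select log_cm_select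
instance (cluster_head : List Int) (cluster_member : List Int) (dead : Int) (cm_select : List (List Int)) (log_cm_select : List (List Int)) (out : List (List Int) × Int × List Int) : Decidable (Spec_ch_collect_data cluster_head cluster_member dead cm_select log_cm_select out) := by unfold Spec_ch_collect_data; infer_instance

-- ===== CLAIM (what is proved, stated in full; the proofs are below) =====
def Claim_equal_ch_collect_data : Prop := ∀ (cluster_head : List Int) (cluster_member : List Int) (dead : Int) (cm_select : List (List Int)) (log_cm_select : List (List Int)), Dom_ch_collect_data cluster_head cluster_member dead cm_select log_cm_select → Pre_ch_collect_data cluster_head cluster_member dead cm_select log_cm_select → Spec_ch_collect_data cluster_head cluster_member dead cm_select log_cm_select (ch_collect_data cluster_head cluster_member dead cm_select log_cm_select)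

-- ===== LEMMAS AND PROOFS =====

-- head count of a head value in a log list
def pvCnt (L : List (List Int)) (k : Int) : Int :=
  (L.countP (fun e => PySem.List.pyGetD e 0 0 == k) : Int)

-- the zero rows appended for heads without members
def pvZ (L : List (List Int)) (n : Nat) : List (List Int) :=
  ((List.range n).filter (fun k : Nat => decide (pvCnt L (k : Int) = 0))).map (fun k : Nat => [(k : Int), 0])

-- Python's running max over Option (the body of PySem.List.max? with identity key)
def pvOpm : Option Int → Int → Option Int
  | none, x => some x
  | some c, x => if c < x then some x else some c

lemma pv_getD_insert_zero (l : List Int) (d : PySem.Dict Int Int) (k : Int) (h : d.getD k 0 = 0) :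
    (l.foldl (fun d ch => d.insert ch (0 : Int)) d).getD k 0 = 0 := by
  induction l generalizing d with
  | nil => simpa using h
  | cons x t ih =>
      simp only [List.foldl_cons]
      refine ih _ ?_
      rw [PySem.Dict.getD_insert]
      split <;> simp [h]

lemma pv_inner_getD (L : List (List Int)) (c k : Int) (d : PySem.Dict Int Int) :
    (L.foldl (fun d e =>
        if c = PySem.List.pyGetD e 0 0 then d.modify c 0 (· + 1) else d) d).getD k 0
      = d.getD k 0 + (if k = c then pvCnt L c else 0) := by
  induction L generalizing d with
  | nil => simp [pvCnt]
  | cons e t ih =>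
      simp only [List.foldl_cons]
      by_cases hc : c = PySem.List.pyGetD e 0 0
      · rw [if_pos hc, ih, PySem.Dict.getD_modify]
        by_cases hk : k = c
        · subst hk
          have hbe : (PySem.List.pyGetD e 0 0 == k) = true := by simp [hc.symm]
          simp [pvCnt, List.countP_cons, hbe]
          push_cast
          ring
        · simp [hk]
      · rw [if_neg hc, ih]
        by_cases hk : k = c
        · simp only [if_pos hk, pvCnt, List.countP_cons]
          have : (PySem.List.pyGetD e 0 0 == c) = false := by
            simpa using fun h => hc h.symm
          rw [this]
          simp
        · simp [hk]

lemma pv_inner_keys (L : List (List Int)) (c : Int) (d : PySem.Dict Int Int)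
    (hc : d.contains c = true) :
    (L.foldl (fun d e =>
        if c = PySem.List.pyGetD e 0 0 then d.modify c 0 (· + 1) else d) d).keys = d.keys ∧
    (L.foldl (fun d e =>
        if c = PySem.List.pyGetD e 0 0 then d.modify c 0 (· + 1) else d) d).contains c = true := by
  induction L generalizing d with
  | nil => exact ⟨rfl, hc⟩
  | cons e t ih =>
      simp only [List.foldl_cons]
      by_cases hcc : c = PySem.List.pyGetD e 0 0
      · rw [if_pos hcc]
        have hck : (d.modify c 0 (· + 1)).keys = d.keys := by
          rw [PySem.Dict.keys_modify, PySem.Dict.keys_insert_of_contains _ _ hc]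
        have hcon : (d.modify c 0 (· + 1)).contains c = true := by
          rw [PySem.Dict.contains_modify]; simp
        obtain ⟨h1, h2⟩ := ih _ hcon
        exact ⟨h1.trans hck, h2⟩
      · rw [if_neg hcc]; exact ih _ hc

lemma pv_outer (ks : List Int) (L : List (List Int)) :
    ∀ d : PySem.Dict Int Int, ks.Nodup → (∀ c ∈ ks, d.contains c = true) →
      (∀ k : Int,
        (ks.foldl (fun d ch1 =>
            (PySem.List.pyRange 0 (PySem.List.len L) 1).foldl (fun d ch2 =>
              if ch1 = PySem.List.pyGetD (PySem.List.pyGetD L ch2 []) 0 0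
              then d.modify ch1 0 (· + 1) else d) d) d).getD k 0
          = d.getD k 0 + (if k ∈ ks then pvCnt L k else 0)) ∧
      (ks.foldl (fun d ch1 =>
          (PySem.List.pyRange 0 (PySem.List.len L) 1).foldl (fun d ch2 =>
            if ch1 = PySem.List.pyGetD (PySem.List.pyGetD L ch2 []) 0 0
            then d.modify ch1 0 (· + 1) else d) d) d).keys = d.keys := by
  induction ks with
  | nil => exact fun d _ _ => ⟨fun k => by simp, rfl⟩
  | cons c t ih =>
      intro d hnd hks
      have hrw : ∀ d0 : PySem.Dict Int Int,
          (PySem.List.pyRange 0 (PySem.List.len L) 1).foldl (fun d ch2 =>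
            if c = PySem.List.pyGetD (PySem.List.pyGetD L ch2 []) 0 0
            then d.modify c 0 (· + 1) else d) d0
          = L.foldl (fun d e =>
            if c = PySem.List.pyGetD e 0 0 then d.modify c 0 (· + 1) else d) d0 := by
        intro d0
        exact PySem.List.foldl_pyRange_zero_pyGetD L []
          (fun d e => if c = PySem.List.pyGetD e 0 0 then d.modify c 0 (· + 1) else d) d0
      have hcd : d.contains c = true := hks c (by simp)
      have hkeys1 := (pv_inner_keys L c d hcd).1
      have hd1 : ∀ c' ∈ t,
          (L.foldl (fun d e =>
            if c = PySem.List.pyGetD e 0 0 then d.modify c 0 (· + 1) else d) d).contains c' = true := by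
        intro c' hc'
        rw [PySem.Dict.contains_iff_mem_keys, hkeys1, ← PySem.Dict.contains_iff_mem_keys]
        exact hks c' (by simp [hc'])
      obtain ⟨ihg, ihk⟩ := ih _ (List.nodup_cons.mp hnd).2 hd1
      constructor
      · intro k
        simp only [List.foldl_cons, hrw]
        rw [ihg k, pv_inner_getD]
        by_cases hk : k = c
        · subst hk
          have hnt : k ∉ t := (List.nodup_cons.mp hnd).1
          simp [hnt]
        · by_cases hkt : k ∈ t <;> simp [hk, hkt]
      · simp only [List.foldl_cons, hrw]
        rw [ihk, hkeys1]

lemma pv_stloop (d : PySem.Dict Int Int) (ks : List Int) :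
    ∀ (a : List Int) (b c : List (List Int)),
      ks.foldl (fun st ch3 =>
          let st' := (st.1 ++ [d.getD ch3 0], st.2.1, st.2.2)
          if d.getD ch3 0 = 0 then (st'.1, st'.2.1 ++ [[ch3, 0]], st'.2.2 ++ [[ch3, 0]]) else st')
        (a, b, c)
      = (a ++ ks.map (fun x => d.getD x 0),
         b ++ (ks.filter (fun x => decide (d.getD x 0 = 0))).map (fun h => [h, 0]),
         c ++ (ks.filter (fun x => decide (d.getD x 0 = 0))).map (fun h => [h, 0])) := by
  induction ks with
  | nil => simp
  | cons x t ih =>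
      intro a b c
      simp only [List.foldl_cons]
      by_cases h : d.getD x 0 = 0
      · simp only [if_pos h, ih, List.filter_cons, List.map_cons]
        simp [h, List.append_assoc]
      · simp only [if_neg h, ih, List.filter_cons, List.map_cons]
        simp [h, List.append_assoc]

lemma pv_counts (n : Nat) (L : List (List Int)) :
    ∀ cs : List Int, cs.length = n →
      (L.foldl (fun cs e =>
          if 0 ≤ PySem.List.pyGetD e 0 0 ∧ PySem.List.pyGetD e 0 0 < (n : Int)
          then PySem.List.pySetD cs (PySem.List.pyGetD e 0 0)
                 (PySem.List.pyGetD cs (PySem.List.pyGetD e 0 0) 0 + 1)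
          else cs) cs).length = n ∧
      ∀ k : Nat, k < n →
        (L.foldl (fun cs e =>
            if 0 ≤ PySem.List.pyGetD e 0 0 ∧ PySem.List.pyGetD e 0 0 < (n : Int)
            then PySem.List.pySetD cs (PySem.List.pyGetD e 0 0)
                   (PySem.List.pyGetD cs (PySem.List.pyGetD e 0 0) 0 + 1)
            else cs) cs).getD k 0
          = cs.getD k 0 + pvCnt L (k : Int) := by
  induction L with
  | nil => exact fun cs h => ⟨h, fun k _ => by simp [pvCnt]⟩
  | cons e t ih =>
      intro cs hlen
      simp only [List.foldl_cons]
      by_cases hg : 0 ≤ PySem.List.pyGetD e 0 0 ∧ PySem.List.pyGetD e 0 0 < (n : Int)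
      · rw [if_pos hg]
        set h := PySem.List.pyGetD e 0 0 with hh
        have hset : PySem.List.pySetD cs h (PySem.List.pyGetD cs h 0 + 1)
            = cs.set h.toNat (PySem.List.pyGetD cs h 0 + 1) :=
          PySem.List.pySetD_of_nonneg cs _ hg.1
        have hlen' : (cs.set h.toNat (PySem.List.pyGetD cs h 0 + 1)).length = n := by
          simpa using hlen
        obtain ⟨h1, h2⟩ := ih _ hlen'
        rw [hset]
        refine ⟨h1, fun k hk => ?_⟩
        rw [h2 k hk]
        have htoNat : h.toNat < cs.length := by omega
        have hget : PySem.List.pyGetD cs h 0 = cs.getD h.toNat 0 :=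
          PySem.List.pyGetD_of_nonneg cs 0 hg.1
        by_cases hke : h.toNat = k
        · have hbe : (PySem.List.pyGetD e 0 0 == (k : Int)) = true := by
            simp only [beq_iff_eq, ← hh]; omega
          simp only [pvCnt, List.countP_cons, hbe, if_true]
          rw [List.getD_eq_getElem?_getD, List.getElem?_set, if_pos hke, if_pos htoNat]
          rw [List.getD_eq_getElem?_getD] at hget ⊢
          simp only [Option.getD_some]
          rw [hget]
          subst hke
          push_cast
          ring
        · have hbe : (PySem.List.pyGetD e 0 0 == (k : Int)) = false := by
            simp only [beq_eq_false_iff_ne, ← hh, ne_eq]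
            intro hc
            apply hke
            omega
          simp only [pvCnt, List.countP_cons, hbe, if_false]
          rw [List.getD_eq_getElem?_getD, List.getElem?_set, if_neg hke,
            ← List.getD_eq_getElem?_getD]
          push_cast
          ring
      · rw [if_neg hg]
        obtain ⟨h1, h2⟩ := ih _ hlen
        refine ⟨h1, fun k hk => ?_⟩
        rw [h2 k hk]
        have hbe : (PySem.List.pyGetD e 0 0 == (k : Int)) = false := by
          simp only [beq_eq_false_iff_ne, ne_eq]
          intro hc
          apply hg
          constructor <;> omega
        simp [pvCnt, List.countP_cons, hbe]

lemma pv_zloop (cond : Nat → Prop) [DecidablePred cond] (l : List Nat) :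
    ∀ b c : List (List Int),
      l.foldl (fun p h =>
          if cond h then (p.1 ++ [[(h : Int), 0]], p.2 ++ [[(h : Int), 0]]) else p) (b, c)
      = (b ++ (l.filter (fun h => decide (cond h))).map (fun h : Nat => [(h : Int), 0]),
         c ++ (l.filter (fun h => decide (cond h))).map (fun h : Nat => [(h : Int), 0])) := by
  induction l with
  | nil => simp
  | cons x t ih =>
      intro b c
      simp only [List.foldl_cons, List.filter_cons]
      by_cases h : cond x
      · simp [h, ih, List.append_assoc]
      · simp [h, ih]

lemma pv_sorted_split {α : Type} (key : α → Int) (v : Int) (S : List α)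
    (hs : S.Pairwise (fun a b => key a ≤ key b)) (hv : ∀ e ∈ S, v ≤ key e) :
    S = S.filter (fun e => key e == v) ++ S.filter (fun e => key e != v) := by
  induction S with
  | nil => rfl
  | cons x t ih =>
      obtain ⟨hx, ht⟩ := List.pairwise_cons.mp hs
      by_cases hxv : key x = v
      · have h1 : (key x == v) = true := by simp [hxv]
        have h2 : (key x != v) = false := by simp [hxv]
        simp only [List.filter_cons, h1, h2, if_true, Bool.false_eq_true, if_false,
          List.cons_append]
        rw [← ih ht (fun e he => hv e (List.mem_cons_of_mem _ he))]
      · have hvlt : v < key x := lt_of_le_of_ne (hv x (by simp)) (fun h => hxv h.symm)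
        have hteq : ∀ e ∈ t, (key e == v) = false := by
          intro e he
          have := hx e he
          simp only [beq_eq_false_iff_ne, ne_eq]
          omega
        have h1 : (key x == v) = false := by simp [hxv]
        have h2 : (key x != v) = true := by simp [hxv]
        simp only [List.filter_cons, h1, h2, Bool.false_eq_true, if_false, if_true]
        rw [List.filter_eq_nil_iff.mpr (fun a ha => by simp [hteq a ha]),
          List.nil_append, List.filter_eq_self.mpr]
        intro a ha
        have := hteq a ha
        simp only [bne_iff_ne, ne_eq]
        simpa using this

lemma pv_sorted_decomp {α : Type} (key : α → Int) (vs : List Int) :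
    ∀ S : List α, vs.Pairwise (· < ·) → (∀ e ∈ S, key e ∈ vs) →
      S.Pairwise (fun a b => key a ≤ key b) →
      S = vs.flatMap (fun v => S.filter (fun e => key e == v)) := by
  induction vs with
  | nil =>
      intro S _ hmem _
      simp only [List.flatMap_nil]
      exact List.eq_nil_iff_forall_not_mem.mpr (fun a ha => by simpa using hmem a ha)
  | cons v t ih =>
      intro S hvs hmem hs
      obtain ⟨hvlt, ht⟩ := List.pairwise_cons.mp hvs
      have hv : ∀ e ∈ S, v ≤ key e := by
        intro e he
        rcases List.mem_cons.mp (hmem e he) with h | h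
        · omega
        · exact le_of_lt (hvlt _ h)
      have hsplit := pv_sorted_split key v S hs hv
      set R := S.filter (fun e => key e != v) with hR
      have hRmem : ∀ e ∈ R, key e ∈ t := by
        intro e he
        obtain ⟨heS, hep⟩ := List.mem_filter.mp he
        have : key e ≠ v := by simpa using hep
        rcases List.mem_cons.mp (hmem e heS) with h | h
        · exact absurd h this
        · exact h
      have hRp : R.Pairwise (fun a b => key a ≤ key b) :=
        List.Pairwise.sublist (List.filter_sublist) hs
      have hRdec := ih R ht hRmem hRp
      have hfilt : ∀ w ∈ t, R.filter (fun e => key e == w) = S.filter (fun e => key e == w) := by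
        intro w hw
        have hwv : w ≠ v := by have := hvlt w hw; omega
        rw [hR, List.filter_filter]
        apply List.filter_congr
        intro a _
        by_cases haw : key a = w
        · simp [haw, hwv]
        · simp [haw]
      rw [List.flatMap_cons, ← List.flatMap_congr (fun w hw => (hfilt w hw)) , ← hRdec]
      exact hsplit

lemma pv_scan_skip (N : List (List Int)) (h : ∀ e ∈ N, PySem.List.pyGetD e 0 0 = -1) :
    ∀ st : List (List (List Int)) × List (List Int) × Int,
      N.foldl (fun st cm =>
        if PySem.List.pyGetD cm 0 0 ≠ -1 ∧ PySem.List.pyGetD cm 0 0 = st.2.2 then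
          (st.1, st.2.1 ++ [cm], st.2.2)
        else if PySem.List.pyGetD cm 0 0 ≠ -1 ∧ PySem.List.pyGetD cm 0 0 ≠ st.2.2 then
          (st.1 ++ [st.2.1], [cm], st.2.2 + 1)
        else st) st = st := by
  induction N with
  | nil => intro st; rfl
  | cons e t ih =>
      intro st
      have he : PySem.List.pyGetD e 0 0 = -1 := h e (by simp)
      simp only [List.foldl_cons, he]
      norm_num
      exact ih (fun e' he' => h e' (List.mem_cons_of_mem _ he')) st

lemma pv_scan_block (b : List (List Int)) :
    ∀ (chs : List (List (List Int))) (log : List (List Int)) (c : Int), c ≠ -1 →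
      (∀ e ∈ b, PySem.List.pyGetD e 0 0 = c) →
      b.foldl (fun st cm =>
        if PySem.List.pyGetD cm 0 0 ≠ -1 ∧ PySem.List.pyGetD cm 0 0 = st.2.2 then
          (st.1, st.2.1 ++ [cm], st.2.2)
        else if PySem.List.pyGetD cm 0 0 ≠ -1 ∧ PySem.List.pyGetD cm 0 0 ≠ st.2.2 then
          (st.1 ++ [st.2.1], [cm], st.2.2 + 1)
        else st) (chs, log, c) = (chs, log ++ b, c) := by
  induction b with
  | nil => intro chs log c _ _; simp
  | cons e t ih =>
      intro chs log c hc hb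
      have he : PySem.List.pyGetD e 0 0 = c := hb e (by simp)
      simp only [List.foldl_cons]
      rw [if_pos (⟨by rw [he]; exact hc, he⟩ :
        PySem.List.pyGetD e 0 0 ≠ -1 ∧ PySem.List.pyGetD e 0 0 = (chs, log, c).2.2)]
      rw [ih chs (log ++ [e]) c hc (fun e' he' => hb e' (List.mem_cons_of_mem _ he'))]
      simp

lemma pv_scan_rest :
    ∀ (m : Nat) (c : Int), 0 ≤ c → ∀ (Bf : Nat → List (List Int))
      (chs : List (List (List Int))) (log : List (List Int)),
      (∀ j, j < m → Bf j ≠ [] ∧ ∀ e ∈ Bf j, PySem.List.pyGetD e 0 0 = c + 1 + j) →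
      (let r := (((List.range m).map Bf).flatten).foldl (fun st cm =>
        if PySem.List.pyGetD cm 0 0 ≠ -1 ∧ PySem.List.pyGetD cm 0 0 = st.2.2 then
          (st.1, st.2.1 ++ [cm], st.2.2)
        else if PySem.List.pyGetD cm 0 0 ≠ -1 ∧ PySem.List.pyGetD cm 0 0 ≠ st.2.2 then
          (st.1 ++ [st.2.1], [cm], st.2.2 + 1)
        else st) (chs, log, c)
       r.1 ++ [r.2.1] = chs ++ [log] ++ (List.range m).map Bf) := by
  intro m
  induction m with
  | zero => intro c _ Bf chs log _; simp
  | succ m ih =>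
      intro c hc Bf chs log hB
      obtain ⟨hB0ne, hB0⟩ := hB 0 (Nat.succ_pos m)
      obtain ⟨e, t, het⟩ := List.exists_cons_of_ne_nil hB0ne
      have he : PySem.List.pyGetD e 0 0 = c + 1 := by
        have := hB0 e (by rw [het]; simp)
        simpa using this
      have hte : ∀ e' ∈ t, PySem.List.pyGetD e' 0 0 = c + 1 := by
        intro e' he'
        have := hB0 e' (by rw [het]; exact List.mem_cons_of_mem _ he')
        simpa using this
      simp only [List.range_succ_eq_map, List.map_cons, List.flatten_cons, List.map_map, het]
      rw [List.foldl_append, List.foldl_cons]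
      rw [if_neg (by
        rw [he]
        rintro ⟨-, h2⟩
        have h2' : c + 1 = c := h2
        omega)]
      rw [if_pos (⟨by rw [he]; intro hcon; omega, by
        rw [he]
        intro hcon
        have h2' : c + 1 = c := hcon
        omega⟩ :
        PySem.List.pyGetD e 0 0 ≠ -1 ∧ PySem.List.pyGetD e 0 0 ≠ (chs, log, c).2.2)]
      rw [pv_scan_block t (chs ++ [log]) [e] (c + 1) (by omega) hte]
      have hrest : ∀ j, j < m → (Bf ∘ Nat.succ) j ≠ [] ∧
          ∀ e' ∈ (Bf ∘ Nat.succ) j, PySem.List.pyGetD e' 0 0 = (c + 1) + 1 + j := by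
        intro j hj
        obtain ⟨h1, h2⟩ := hB (j + 1) (by omega)
        refine ⟨h1, fun e' he' => ?_⟩
        rw [h2 e' he']
        push_cast
        ring
      have hih := ih (c + 1) (by omega) (Bf ∘ Nat.succ) (chs ++ [log]) ([e] ++ t) hrest
      simp only at hih
      rw [hih]
      simp [List.append_assoc]

lemma pv_best_get? (M : List (List Int)) :
    ∀ (b : PySem.Dict Int Int) (h : Int), h ≠ -1 →
      (M.foldl (fun b e =>
        if PySem.List.pyGetD e 0 0 ≠ -1 then
          (if b.contains (PySem.List.pyGetD e 0 0) = false ∨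
              b.getD (PySem.List.pyGetD e 0 0) 0 < PySem.List.pyGetD e 1 0
           then b.insert (PySem.List.pyGetD e 0 0) (PySem.List.pyGetD e 1 0) else b)
        else b) b).get? h
      = ((M.filter (fun e => PySem.List.pyGetD e 0 0 == h)).map
          (fun e => PySem.List.pyGetD e 1 0)).foldl pvOpm (b.get? h) := by
  induction M with
  | nil => intro b h _; rfl
  | cons e t ih =>
      intro b h hne
      simp only [List.foldl_cons, List.filter_cons]
      by_cases hg1 : PySem.List.pyGetD e 0 0 = -1
      · have hbe : (PySem.List.pyGetD e 0 0 == h) = false := by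
          simp [hg1]; omega
        rw [if_neg (by simp [hg1]), hbe]
        simp only [Bool.false_eq_true, if_false]
        exact ih b h hne
      · rw [if_pos hg1]
        by_cases hgh : PySem.List.pyGetD e 0 0 = h
        · have hbe : (PySem.List.pyGetD e 0 0 == h) = true := by simp [hgh]
          rw [hbe]
          simp only [if_true, List.map_cons, List.foldl_cons]
          have hstep :
              (if b.contains (PySem.List.pyGetD e 0 0) = false ∨
                  b.getD (PySem.List.pyGetD e 0 0) 0 < PySem.List.pyGetD e 1 0
               then b.insert (PySem.List.pyGetD e 0 0) (PySem.List.pyGetD e 1 0)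
               else b).get? h = pvOpm (b.get? h) (PySem.List.pyGetD e 1 0) := by
            rw [hgh]
            cases hbh : b.get? h with
            | none =>
                have hco : b.contains h = false := by
                  rw [PySem.Dict.contains_eq_isSome_get?, hbh]; rfl
                rw [if_pos (Or.inl hco), PySem.Dict.get?_insert_self]
                rfl
            | some cv =>
                have hco : b.contains h = true := by
                  rw [PySem.Dict.contains_eq_isSome_get?, hbh]; rfl
                have hgd : b.getD h 0 = cv := by
                  rw [PySem.Dict.getD_eq_get?_getD, hbh]; rfl
                by_cases hlt : cv < PySem.List.pyGetD e 1 0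
                · rw [if_pos (Or.inr (by rw [hgd]; exact hlt)), PySem.Dict.get?_insert_self]
                  simp [pvOpm, hlt]
                · rw [if_neg (by rw [hgd]; simp [hco, hlt]), hbh]
                  simp [pvOpm, hlt]
          rw [ih _ h hne, hstep]
        · have hbe : (PySem.List.pyGetD e 0 0 == h) = false := by simp [hgh]
          rw [hbe]
          simp only [Bool.false_eq_true, if_false]
          have hstep :
              (if b.contains (PySem.List.pyGetD e 0 0) = false ∨
                  b.getD (PySem.List.pyGetD e 0 0) 0 < PySem.List.pyGetD e 1 0
               then b.insert (PySem.List.pyGetD e 0 0) (PySem.List.pyGetD e 1 0)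
               else b).get? h = b.get? h := by
            split
            · exact PySem.Dict.get?_insert_of_ne _ _ (fun hch => hgh hch.symm)
            · rfl
          rw [ih _ h hne, hstep]

lemma pv_opm_some (l : List Int) : ∀ a : Int, l.foldl pvOpm (some a) = some (l.foldl max a) := by
  induction l with
  | nil => intro a; rfl
  | cons x t ih =>
      intro a
      simp only [List.foldl_cons]
      have h : pvOpm (some a) x = some (max a x) := by
        simp only [pvOpm]
        by_cases h : a < x
        · rw [if_pos h, max_eq_right h.le]
        · rw [if_neg h, max_eq_left (by omega)]
      rw [h, ih]

lemma pv_max?_eq (l : List Int) : PySem.List.max? l (fun b => b) = l.max? := by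
  have h1 : PySem.List.max? l (fun b => b) = l.foldl pvOpm none := by
    simp only [PySem.List.max?]
    exact PySem.List.foldl_congr_mem _ _ _ _ (fun acc x _ => by cases acc <;> rfl)
  cases l with
  | nil => rw [h1]; rfl
  | cons x t =>
      rw [h1, List.foldl_cons]
      show t.foldl pvOpm (some x) = _
      rw [pv_opm_some]
      rfl

lemma pv_max?_perm (l l' : List Int) (hp : l.Perm l') : l.max? = l'.max? := by
  cases h : l.max? with
  | none =>
      rw [List.max?_eq_none_iff] at h
      subst h
      rw [List.max?_eq_none_iff.mpr (hp.nil_eq ▸ rfl)]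
  | some a =>
      rw [List.max?_eq_some_iff] at h
      exact (List.max?_eq_some_iff.mpr
        ⟨hp.mem_iff.mp h.1, fun b hb => h.2 b (hp.mem_iff.mpr hb)⟩).symm

lemma pv_getD_map_range {α : Type} (f : Nat → α) (d : α) (n h : Nat) (hh : h < n) :
    ((List.range n).map f).getD h d = f h := by
  rw [List.getD_eq_getElem?_getD, List.getElem?_map, List.getElem?_range hh]
  rfl

lemma pv_counts_eq (n : Nat) (L : List (List Int)) :
    L.foldl (fun cs e =>
        if 0 ≤ PySem.List.pyGetD e 0 0 ∧ PySem.List.pyGetD e 0 0 < (n : Int)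
        then PySem.List.pySetD cs (PySem.List.pyGetD e 0 0)
               (PySem.List.pyGetD cs (PySem.List.pyGetD e 0 0) 0 + 1)
        else cs) (List.replicate n 0)
      = (List.range n).map (fun k : Nat => pvCnt L (k : Int)) := by
  obtain ⟨h1, h2⟩ := pv_counts n L (List.replicate n 0) (by simp)
  apply List.ext_getElem (by simp [h1])
  intro i hi1 hi2
  have hi : i < n := by rwa [h1] at hi1
  have hgd := h2 i hi
  rw [List.getD_replicate _ hi, zero_add] at hgd
  rw [List.getD_eq_getElem?_getD, List.getElem?_eq_getElem hi1, Option.getD_some] at hgd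
  rw [hgd, List.getElem_map, List.getElem_range]

lemma pv_bestD (M : List (List Int)) (k : Nat)
    (hne : M.filter (fun e => PySem.List.pyGetD e 0 0 == (k : Int)) ≠ []) :
    (M.foldl (fun b e =>
        if PySem.List.pyGetD e 0 0 ≠ -1 then
          (if b.contains (PySem.List.pyGetD e 0 0) = false ∨
              b.getD (PySem.List.pyGetD e 0 0) 0 < PySem.List.pyGetD e 1 0
           then b.insert (PySem.List.pyGetD e 0 0) (PySem.List.pyGetD e 1 0) else b)
        else b) PySem.Dict.empty).getD (k : Int) 0
      = ((M.filter (fun e => PySem.List.pyGetD e 0 0 == (k : Int))).map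
          (fun e => PySem.List.pyGetD e 1 0)).max?.getD 0 := by
  have hk : ((k : Nat) : Int) ≠ -1 := by omega
  rw [PySem.Dict.getD_eq_get?_getD, pv_best_get? M PySem.Dict.empty _ hk,
    PySem.Dict.get?_empty]
  obtain ⟨x, t, hxt⟩ := List.exists_cons_of_ne_nil hne
  rw [hxt, List.map_cons, List.foldl_cons]
  rw [show pvOpm none (PySem.List.pyGetD x 1 0) = some (PySem.List.pyGetD x 1 0) from rfl,
    pv_opm_some]
  rfl

lemma pv_present (L : List (List Int)) (n k : Nat) (hk : k < n) :
    (L ++ pvZ L n).filter (fun e => PySem.List.pyGetD e 0 0 == (k : Int)) ≠ [] := by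
  by_cases h0 : pvCnt L (k : Int) = 0
  · have hmm : ([(k : Int), 0] : List Int) ∈ L ++ pvZ L n :=
      List.mem_append.mpr (Or.inr (List.mem_map.mpr
        ⟨k, List.mem_filter.mpr ⟨List.mem_range.mpr hk, by simp [h0]⟩, rfl⟩))
    exact List.ne_nil_of_mem
      (List.mem_filter.mpr ⟨hmm, by simp [PySem.List.pyGetD_zero]⟩)
  · have hpos : 0 < L.countP (fun e => PySem.List.pyGetD e 0 0 == (k : Int)) := by
      rcases Nat.eq_zero_or_pos (L.countP (fun e => PySem.List.pyGetD e 0 0 == (k : Int))) with h | h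
      · exact absurd (by simp [pvCnt, h]) h0
      · exact h
    obtain ⟨e, he, hp⟩ := List.countP_pos_iff.mp hpos
    exact List.ne_nil_of_mem (List.mem_filter.mpr ⟨List.mem_append.mpr (Or.inl he), hp⟩)

lemma pv_scan_all (S : List (List Int)) (n : Nat) (hn : 0 < n)
    (hmem : ∀ e ∈ S, PySem.List.pyGetD e 0 0 = -1 ∨
      (0 ≤ PySem.List.pyGetD e 0 0 ∧ PySem.List.pyGetD e 0 0 < (n : Int)))
    (hsort : S.Pairwise (fun a b => PySem.List.pyGetD a 0 0 ≤ PySem.List.pyGetD b 0 0))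
    (hne : ∀ k : Nat, k < n → S.filter (fun e => PySem.List.pyGetD e 0 0 == (k : Int)) ≠ []) :
    (S.foldl (fun st cm =>
        if PySem.List.pyGetD cm 0 0 ≠ -1 ∧ PySem.List.pyGetD cm 0 0 = st.2.2 then
          (st.1, st.2.1 ++ [cm], st.2.2)
        else if PySem.List.pyGetD cm 0 0 ≠ -1 ∧ PySem.List.pyGetD cm 0 0 ≠ st.2.2 then
          (st.1 ++ [st.2.1], [cm], st.2.2 + 1)
        else st) ([], [], 0)).1
      ++ [(S.foldl (fun st cm =>
        if PySem.List.pyGetD cm 0 0 ≠ -1 ∧ PySem.List.pyGetD cm 0 0 = st.2.2 then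
          (st.1, st.2.1 ++ [cm], st.2.2)
        else if PySem.List.pyGetD cm 0 0 ≠ -1 ∧ PySem.List.pyGetD cm 0 0 ≠ st.2.2 then
          (st.1 ++ [st.2.1], [cm], st.2.2 + 1)
        else st) ([], [], 0)).2.1]
      = (List.range n).map (fun k : Nat => S.filter (fun e => PySem.List.pyGetD e 0 0 == (k : Int))) := by
  obtain ⟨m, rfl⟩ : ∃ m, n = m + 1 := ⟨n - 1, by omega⟩
  have hvs : ((-1) :: (List.range (m + 1)).map (fun k : Nat => (k : Int))).Pairwise (· < ·) := by
    rw [List.pairwise_cons]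
    constructor
    · intro v hv
      obtain ⟨k, _, rfl⟩ := List.mem_map.mp hv
      omega
    · rw [List.pairwise_map]
      exact List.pairwise_lt_range.imp (by intro a b h; exact_mod_cast h)
  have hSin : ∀ e ∈ S, PySem.List.pyGetD e 0 0 ∈
      (-1) :: (List.range (m + 1)).map (fun k : Nat => (k : Int)) := by
    intro e he
    rcases hmem e he with h | ⟨h1, h2⟩
    · simp [h]
    · exact List.mem_cons_of_mem _ (List.mem_map.mpr
        ⟨(PySem.List.pyGetD e 0 0).toNat, List.mem_range.mpr (by omega), by omega⟩)
  have hdec := pv_sorted_decomp (fun ch => PySem.List.pyGetD ch 0 0) _ S hvs hSin hsort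
  rw [List.flatMap_cons, List.flatMap_map] at hdec
  conv_lhs => rw [hdec]
  rw [List.foldl_append,
    pv_scan_skip _ (fun e hee => by simpa using (List.mem_filter.mp hee).2) ([], [], 0)]
  rw [List.range_succ_eq_map, List.flatMap_cons, List.flatMap_map, Nat.cast_zero]
  have h0ne := hne 0 (by omega)
  rw [Nat.cast_zero] at h0ne
  obtain ⟨e, t, het⟩ := List.exists_cons_of_ne_nil h0ne
  have he0 : PySem.List.pyGetD e 0 0 = 0 := by
    have : e ∈ S.filter (fun e => PySem.List.pyGetD e 0 0 == (0 : Int)) := by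
      rw [het]; simp
    simpa using (List.mem_filter.mp this).2
  have ht0 : ∀ x ∈ t, PySem.List.pyGetD x 0 0 = 0 := by
    intro x hx
    have : x ∈ S.filter (fun e => PySem.List.pyGetD e 0 0 == (0 : Int)) := by
      rw [het]; exact List.mem_cons_of_mem _ hx
    simpa using (List.mem_filter.mp this).2
  rw [List.foldl_append, het, List.foldl_cons]
  rw [if_pos (⟨by rw [he0]; omega, he0⟩ :
    PySem.List.pyGetD e 0 0 ≠ -1 ∧
      PySem.List.pyGetD e 0 0 = (([], [], 0) :
        List (List (List Int)) × List (List Int) × Int).2.2)]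
  dsimp only
  rw [pv_scan_block t [] ([] ++ [e]) 0 (by omega) ht0, List.nil_append]
  simp only [List.singleton_append]
  have hrest : ∀ j, j < m →
      S.filter (fun e => PySem.List.pyGetD e 0 0 == ((Nat.succ j : Nat) : Int)) ≠ [] ∧
      ∀ e' ∈ S.filter (fun e => PySem.List.pyGetD e 0 0 == ((Nat.succ j : Nat) : Int)),
        PySem.List.pyGetD e' 0 0 = 0 + 1 + (j : Int) := by
    intro j hj
    refine ⟨hne (j + 1) (by omega), fun e' he' => ?_⟩
    have := (List.mem_filter.mp he').2
    have heq : PySem.List.pyGetD e' 0 0 = ((j + 1 : Nat) : Int) := by simpa using this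
    rw [heq]
    push_cast
    ring
  have hflat : (List.range m).flatMap
        (fun a => S.filter (fun e => PySem.List.pyGetD e 0 0 == ((Nat.succ a : Nat) : Int)))
      = ((List.range m).map
        (fun a => S.filter (fun e => PySem.List.pyGetD e 0 0 == ((Nat.succ a : Nat) : Int)))).flatten := by
    rw [List.flatMap_def]
  rw [hflat]
  have := pv_scan_rest m 0 (by omega)
    (fun j => S.filter (fun e => PySem.List.pyGetD e 0 0 == ((Nat.succ j : Nat) : Int)))
    [] (e :: t) hrest
  simp only at this
  rw [this, ← het]
  simp [Function.comp_def]

-- ===== main equivalence on the dead = 0 branch =====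
lemma pv_main (cluster_head cluster_member : List Int) (cm_select log_cm_select : List (List Int))
    (hne : cluster_head ≠ [])
    (hent : ∀ e ∈ log_cm_select, e ≠ [] ∧
      (e.getD 0 0 = -1 ∨ (0 ≤ e.getD 0 0 ∧ e.getD 0 0 < (cluster_head.length : Int) ∧ e.length = 2))) :
    ch_collect_data cluster_head cluster_member 0 cm_select log_cm_select
      = ch_collect_data_alt cluster_head cluster_member 0 cm_select log_cm_select := by
  have hn : 0 < cluster_head.length := List.length_pos_of_ne_nil hne
  have hL' : ∀ e ∈ log_cm_select ++ pvZ log_cm_select cluster_head.length,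
      PySem.List.pyGetD e 0 0 = -1 ∨
        (0 ≤ PySem.List.pyGetD e 0 0 ∧
          PySem.List.pyGetD e 0 0 < (cluster_head.length : Int)) := by
    intro e he
    rcases List.mem_append.mp he with h | h
    · rcases (hent e h).2 with h1 | ⟨h1, h2, _⟩
      · left; rw [PySem.List.pyGetD_zero]; exact h1
      · right
        rw [PySem.List.pyGetD_zero]
        exact ⟨h1, h2⟩
    · obtain ⟨k, hk, rfl⟩ := List.mem_map.mp h
      right
      have hkr := List.mem_range.mp (List.mem_filter.mp hk).1
      rw [PySem.List.pyGetD_zero]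
      constructor
      · simp
      · simpa using hkr
  simp only [ch_collect_data, ch_collect_data_alt]
  simp only [reduceIte]
  -- A: the seeded dict amount0
  set A0 : PySem.Dict Int Int := List.foldl (fun d ch => d.insert ch (0 : Int))
    PySem.Dict.empty (PySem.List.pyRange 0 (PySem.List.len cluster_head) 1) with hA0
  have hA0keys : A0.keys = PySem.List.pyRange 0 (PySem.List.len cluster_head) 1 := by
    rw [hA0, PySem.Dict.keys_foldl_insert _ (fun _ _ => (0 : Int)), PySem.Dict.keys_empty,
      PySem.Set.update_nil_left]
    exact PySem.Set.ofList_eq_self_of_nodup _ (PySem.List.nodup_pyRange_one 0 _)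
  have hA0getD : ∀ k : Int, A0.getD k 0 = 0 := by
    intro k
    rw [hA0]
    exact pv_getD_insert_zero _ _ _ (PySem.Dict.getD_empty _ _)
  have hA0cont : ∀ c ∈ PySem.List.pyRange 0 (PySem.List.len cluster_head) 1,
      A0.contains c = true :=
    fun c hc => (PySem.Dict.contains_iff_mem_keys _ _).mpr (hA0keys ▸ hc)
  rw [hA0keys]
  obtain ⟨hAget0, hAkeys0⟩ := pv_outer (PySem.List.pyRange 0 (PySem.List.len cluster_head) 1)
    log_cm_select A0 (PySem.List.nodup_pyRange_one 0 _) hA0cont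
  set AM : PySem.Dict Int Int := List.foldl (fun d ch1 =>
      List.foldl (fun d ch2 =>
        if ch1 = PySem.List.pyGetD (PySem.List.pyGetD log_cm_select ch2 []) 0 0
        then d.modify ch1 0 (· + 1) else d) d
        (PySem.List.pyRange 0 (PySem.List.len log_cm_select) 1)) A0
    (PySem.List.pyRange 0 (PySem.List.len cluster_head) 1) with hAM
  have hAget : ∀ k ∈ PySem.List.pyRange 0 (PySem.List.len cluster_head) 1,
      AM.getD k 0 = pvCnt log_cm_select k := by
    intro k hk
    rw [hAM, hAget0 k, hA0getD k, if_pos hk, zero_add]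
  have hAMkeys : AM.keys = PySem.List.pyRange 0 (PySem.List.len cluster_head) 1 := by
    rw [hAM, hAkeys0, hA0keys]
  rw [hAMkeys, pv_stloop AM (PySem.List.pyRange 0 (PySem.List.len cluster_head) 1)
    [] cm_select log_cm_select]
  dsimp only
  rw [List.nil_append]
  -- A: counts list and zero rows
  have hcntmap : (PySem.List.pyRange 0 (PySem.List.len cluster_head) 1).map
        (fun x => AM.getD x 0)
      = (List.range cluster_head.length).map (fun k : Nat => pvCnt log_cm_select (k : Int)) := by
    rw [List.map_congr_left (fun a ha => hAget a ha), PySem.List.len_eq,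
      PySem.List.pyRange_zero_nat, List.map_map]
    simp [Function.comp_def]
  have hzs : ((PySem.List.pyRange 0 (PySem.List.len cluster_head) 1).filter
        (fun x => decide (AM.getD x 0 = 0))).map (fun h => [h, 0])
      = pvZ log_cm_select cluster_head.length := by
    rw [List.filter_congr (fun x hx => by rw [hAget x hx]), PySem.List.len_eq,
      PySem.List.pyRange_zero_nat, List.filter_map, List.map_map]
    simp only [pvZ, Function.comp_def]
  rw [hcntmap, hzs]
  -- B: counts list
  rw [pv_counts_eq cluster_head.length log_cm_select]
  -- B: zero rows
  rw [pv_zloop (fun h => ((List.range cluster_head.length).map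
      (fun k : Nat => pvCnt log_cm_select (k : Int))).getD h 0 = 0)
    (List.range cluster_head.length) cm_select log_cm_select]
  dsimp only
  have hzcong : (List.range cluster_head.length).filter
        (fun h => decide (((List.range cluster_head.length).map
          (fun k : Nat => pvCnt log_cm_select (k : Int))).getD h 0 = 0))
      = (List.range cluster_head.length).filter
        (fun k : Nat => decide (pvCnt log_cm_select (k : Int) = 0)) :=
    List.filter_congr (fun h hh => by
      rw [pv_getD_map_range _ _ _ _ (List.mem_range.mp hh)])
  rw [hzcong]
  rw [show ((List.range cluster_head.length).filter
        (fun k : Nat => decide (pvCnt log_cm_select (k : Int) = 0))).map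
        (fun h : Nat => [(h : Int), 0])
      = pvZ log_cm_select cluster_head.length from rfl]
  -- the common appended log
  set L' : List (List Int) := log_cm_select ++ pvZ log_cm_select cluster_head.length with hL'def
  -- the sorted list and its facts
  set S : List (List Int) := PySem.List.sorted L' (fun ch => PySem.List.pyGetD ch 0 0) false
    with hS
  have hSperm : S.Perm L' := PySem.List.sorted_perm L' _ _
  have hSsort : S.Pairwise (fun a b => PySem.List.pyGetD a 0 0 ≤ PySem.List.pyGetD b 0 0) := by
    rw [hS]
    exact PySem.List.sorted_pairwise L' _
  have hSmem : ∀ e ∈ S, PySem.List.pyGetD e 0 0 = -1 ∨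
      (0 ≤ PySem.List.pyGetD e 0 0 ∧
        PySem.List.pyGetD e 0 0 < (cluster_head.length : Int)) := by
    intro e he
    exact hL' e (hSperm.mem_iff.mp he)
  have hSne : ∀ k : Nat, k < cluster_head.length →
      S.filter (fun e => PySem.List.pyGetD e 0 0 == (k : Int)) ≠ [] := by
    intro k hk hnil
    have hp := hSperm.filter (fun e => PySem.List.pyGetD e 0 0 == (k : Int))
    rw [hnil] at hp
    exact pv_present log_cm_select cluster_head.length k hk (hp.nil_eq).symm
  rw [pv_scan_all S cluster_head.length hn hSmem hSsort hSne]
  -- A: the max loop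
  rw [PySem.List.foldl_append_singleton_eq_map (fun k =>
    [k, (PySem.List.max? ((PySem.List.pyGetD ((List.range cluster_head.length).map
      (fun k : Nat => S.filter (fun e => PySem.List.pyGetD e 0 0 == (k : Int)))) k []).map
      (fun e => PySem.List.pyGetD e 1 0)) (fun b => b)).getD 0]) _ [], List.nil_append]
  rw [show PySem.List.len ((List.range cluster_head.length).map
      (fun k : Nat => S.filter (fun e => PySem.List.pyGetD e 0 0 == (k : Int))))
    = (cluster_head.length : Int) from by simp [PySem.List.len_eq]]
  rw [PySem.List.pyRange_zero_nat, List.map_map]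
  -- finish componentwise
  have hmd : ∀ k ∈ List.range cluster_head.length,
      ((fun k => [k, (PySem.List.max? ((PySem.List.pyGetD ((List.range cluster_head.length).map
          (fun k : Nat => S.filter (fun e => PySem.List.pyGetD e 0 0 == (k : Int)))) k []).map
          (fun e => PySem.List.pyGetD e 1 0)) (fun b => b)).getD 0]) ∘ (fun k : Nat => (k : Int))) k
      = [(k : Int), (List.foldl (fun b e =>
          if PySem.List.pyGetD e 0 0 ≠ -1 then
            (if b.contains (PySem.List.pyGetD e 0 0) = false ∨
                b.getD (PySem.List.pyGetD e 0 0) 0 < PySem.List.pyGetD e 1 0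
             then b.insert (PySem.List.pyGetD e 0 0) (PySem.List.pyGetD e 1 0) else b)
          else b) PySem.Dict.empty L').getD (k : Int) 0] := by
    intro k hk
    have hkn := List.mem_range.mp hk
    simp only [Function.comp_def]
    rw [PySem.List.pyGetD_natCast, pv_getD_map_range _ _ _ _ hkn]
    rw [pv_max?_eq, pv_bestD L' k (by
      rw [hL'def]
      exact pv_present log_cm_select cluster_head.length k hkn)]
    have hpm := pv_max?_perm
      ((S.filter (fun e => PySem.List.pyGetD e 0 0 == (k : Int))).map
        (fun e => PySem.List.pyGetD e 1 0))
      ((L'.filter (fun e => PySem.List.pyGetD e 0 0 == (k : Int))).map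
        (fun e => PySem.List.pyGetD e 1 0))
      ((hSperm.filter _).map _)
    rw [hpm]
  rw [List.map_congr_left hmd, if_neg (show ¬((0 : Int) ≠ 0) by simp)]

-- ===== VERDICT (by name: the statement is the Claim_ definition above) =====
theorem ch_collect_data_spec : Claim_equal_ch_collect_data := by
  intro cluster_head cluster_member dead cm_select log_cm_select _ hPre
  unfold Spec_ch_collect_data
  by_cases hd0 : dead = 0
  · subst hd0
    rcases hPre with h | ⟨hne, hent⟩
    · exact absurd rfl h
    · exact pv_main cluster_head cluster_member cm_select log_cm_select hne hent
  · unfold ch_collect_data ch_collect_data_alt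
    rw [if_neg hd0, if_pos hd0]
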